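-- pv_equiv track=rewrite | github.com/Nawfal3D/AICE2005 | tools/marp_concat.py | removeEndContent
-- ===== SOURCE A (Python) =====
-- def removeEndContent(content):
--     """
--     Remove end content from the given content.
--
--     Args:
--         content (str): The content of a Markdown file.
--
--     Returns:
--         str: The content with end content removed.
--     """
--     char_start = len(content)
--     end_marker = [
--             "\n<!-- _class: end -->",
--             "\n<!-- _class: end-bg -->",
--             "\n<!-- _class: contact -->",
--             "\n<!-- _class: information -->",
--     ]
--     for endm in end_marker:
--         chars = content.find(endm)
--         if chars != -1:
--             char_start = min(chars, char_start)
--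
--     if char_start != len(content):
--         content = content[:char_start]
--
--     return content
-- ===== SOURCE B (Python) =====
-- def removeEndContent(content):
--     """
--     Remove end content from the given content.
--
--     Single left-to-right scan: truncate at the first position where any
--     end marker begins; if none occurs, return content unchanged.
--     """
--     markers = (
--         "\n<!-- _class: end -->",
--         "\n<!-- _class: end-bg -->",
--         "\n<!-- _class: contact -->",
--         "\n<!-- _class: information -->",
--     )
--     for i in range(len(content)):
--         if content.startswith(markers, i):
--             return content[:i]
--     return content
-- ===== Notes on version B (the rewrite author's own statement) =====
-- stated objective: idiomatic
-- what changed: Replaces four separate .find scans with a running min by one left-to-right scan that truncates at the first position where any marker starts (str.startswith with a tuple of markers).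
import Mathlib
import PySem

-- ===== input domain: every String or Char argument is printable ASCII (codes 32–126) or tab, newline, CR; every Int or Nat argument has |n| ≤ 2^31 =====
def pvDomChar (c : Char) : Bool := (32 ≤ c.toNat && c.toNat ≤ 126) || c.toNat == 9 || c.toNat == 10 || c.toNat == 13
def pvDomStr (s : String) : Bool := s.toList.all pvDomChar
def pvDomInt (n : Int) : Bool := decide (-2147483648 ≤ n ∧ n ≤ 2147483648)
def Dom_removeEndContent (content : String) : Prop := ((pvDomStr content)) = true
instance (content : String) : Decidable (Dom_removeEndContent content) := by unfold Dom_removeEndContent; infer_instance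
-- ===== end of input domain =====

-- B changes A's four .find scans + running min into one left-to-right scan that stops at the
-- first position where any marker starts (objective: idiomatic single pass, same result).

-- the four end markers, shared data of both ports
def pvEndMarkers : List (List Char) :=
  [ "\n<!-- _class: end -->".toList
  , "\n<!-- _class: end-bg -->".toList
  , "\n<!-- _class: contact -->".toList
  , "\n<!-- _class: information -->".toList ]

-- ===== PORT A =====
-- the for-loop over end_marker updating char_start
def pvAFold (cs : List Char) : Int :=
  pvEndMarkers.foldl
    (fun acc m =>
      let chars := PySem.Chars.find cs m
      if chars ≠ -1 then min chars acc else acc)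
    (cs.length : Int)

def removeEndContent (content : String) : String :=
  let cs := content.toList
  let char_start := pvAFold cs
  -- content[:char_start]: char_start is a nonnegative in-range index here, so take is exact
  if char_start ≠ (cs.length : Int) then String.ofList (cs.take char_start.toNat) else content

-- ===== PORT B =====
-- content.startswith(markers, i) : does any marker start at this position?
def pvBMatch (cs : List Char) : Bool := pvEndMarkers.any (fun m => m.isPrefixOf cs)

-- the scan 'for i in range(len(content)): if startswith … return content[:i]'
def pvBScan : List Char → Option Nat
  | [] => none
  | c :: rest => if pvBMatch (c :: rest) then some 0 else (pvBScan rest).map (· + 1)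

def removeEndContent_alt (content : String) : String :=
  match pvBScan content.toList with
  | some i => String.ofList (content.toList.take i)
  | none => content

-- ===== PRECONDITION & SPEC =====
def Spec_removeEndContent (content : String) (out : String) : Prop := out = removeEndContent_alt content
instance (content : String) (out : String) : Decidable (Spec_removeEndContent content out) := by unfold Spec_removeEndContent; infer_instance

-- ===== CLAIM (what is proved, stated in full; the proofs are below) =====
def Claim_equal_removeEndContent : Prop := ∀ (content : String), Dom_removeEndContent content → Spec_removeEndContent content (removeEndContent content)

-- ===== LEMMAS AND PROOFS =====

theorem pvEndMarkers_ne_nil : ∀ m ∈ pvEndMarkers, m ≠ [] := by decide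

theorem pvBMatch_iff (cs : List Char) :
    pvBMatch cs = true ↔ ∃ m ∈ pvEndMarkers, m <+: cs := by
  simp [pvBMatch, List.any_eq_true, List.isPrefixOf_iff_prefix]

theorem pvBScan_none_iff (cs : List Char) :
    pvBScan cs = none ↔ ∀ i, pvBMatch (cs.drop i) = false := by
  induction cs with
  | nil =>
    simp only [pvBScan, List.drop_nil, true_iff]
    intro i
    decide
  | cons c rest ih =>
    constructor
    · intro h i
      simp only [pvBScan] at h
      split_ifs at h with hm
      -- the true branch (h : some 0 = none) is discharged by split_ifs itself
      have hrest : pvBScan rest = none := by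
          cases hr : pvBScan rest with
          | none => rfl
          | some k => rw [hr] at h; simp at h
      cases i with
      | zero => simpa using hm
      | succ j => exact ih.mp hrest j
    · intro h
      have h0 : pvBMatch (c :: rest) = false := by simpa using h 0
      have hrest : pvBScan rest = none := ih.mpr (fun j => h (j + 1))
      simp [pvBScan, h0, hrest]
theorem pvBScan_some_iff (cs : List Char) (j : Nat) :
    pvBScan cs = some j ↔
      pvBMatch (cs.drop j) = true ∧ ∀ i < j, pvBMatch (cs.drop i) = false := by
  induction cs generalizing j with
  | nil =>
    simp only [pvBScan, List.drop_nil]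
    constructor
    · intro h; cases h
    · rintro ⟨h, -⟩; exact absurd h (by decide)
  | cons c rest ih =>
    constructor
    · intro h
      simp only [pvBScan] at h
      split_ifs at h with hm
      · cases h
        exact ⟨by simpa using hm, fun i hi => absurd hi (by omega)⟩
      · rcases j with _ | j
        · exact absurd h (by simp [Option.map_eq_some_iff])
        · simp only [Option.map_eq_some_iff] at h
          obtain ⟨k, hk, hkj⟩ := h
          have hj : k = j := by omega
          subst hj
          obtain ⟨h1, h2⟩ := (ih k).mp hk
          refine ⟨by simpa using h1, ?_⟩
          intro i hi
          cases i with
          | zero => simpa using hm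
          | succ i' => simpa using h2 i' (by omega)
    · rintro ⟨h1, h2⟩
      cases j with
      | zero =>
        simp only [List.drop_zero] at h1
        simp [pvBScan, h1]
      | succ j' =>
        have hm : pvBMatch (c :: rest) = false := by simpa using h2 0 (by omega)
        have : pvBScan rest = some j' := by
          apply (ih j').mpr
          exact ⟨by simpa using h1, fun i hi => by simpa using h2 (i + 1) (by omega)⟩
        simp [pvBScan, hm, this]

-- find of each marker, as used by A's fold
theorem pvAFold_le_acc_aux (cs : List Char) (ms : List (List Char)) (acc : Int) :
    (ms.foldl (fun acc m =>
        let chars := PySem.Chars.find cs m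
        if chars ≠ -1 then min chars acc else acc) acc) ≤ acc := by
  induction ms generalizing acc with
  | nil => simp
  | cons m ms ih =>
    simp only [List.foldl_cons]
    split_ifs with h
    · exact le_trans (ih _) (min_le_right _ _)
    · exact ih acc

theorem pvAFold_le_find_aux (cs : List Char) (ms : List (List Char)) (acc : Int)
    (m0 : List Char) (hm : m0 ∈ ms) (hf : PySem.Chars.find cs m0 ≠ -1) :
    (ms.foldl (fun acc m =>
        let chars := PySem.Chars.find cs m
        if chars ≠ -1 then min chars acc else acc) acc) ≤ PySem.Chars.find cs m0 := by
  induction ms generalizing acc with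
  | nil => cases hm
  | cons m ms ih =>
    simp only [List.foldl_cons]
    rcases List.mem_cons.mp hm with rfl | hm'
    · simp only [if_pos hf]
      exact le_trans (pvAFold_le_acc_aux cs ms _) (min_le_left _ _)
    · split_ifs with h
      · exact ih _ hm'
      · exact ih acc hm'

theorem pvAFold_ge_aux (cs : List Char) (ms : List (List Char)) (acc : Int) (b : Int)
    (hacc : b ≤ acc)
    (hms : ∀ m ∈ ms, PySem.Chars.find cs m ≠ -1 → b ≤ PySem.Chars.find cs m) :
    b ≤ (ms.foldl (fun acc m =>
        let chars := PySem.Chars.find cs m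
        if chars ≠ -1 then min chars acc else acc) acc) := by
  induction ms generalizing acc with
  | nil => simpa using hacc
  | cons m ms ih
  =>
    simp only [List.foldl_cons]
    split_ifs with h
    · exact ih _ (le_min (hms m (List.mem_cons_self) h) hacc)
        (fun m' hm' => hms m' (List.mem_cons_of_mem _ hm'))
    · exact ih acc hacc (fun m' hm' => hms m' (List.mem_cons_of_mem _ hm'))

theorem pvAFold_eq_acc_aux (cs : List Char) (ms : List (List Char)) (acc : Int)
    (hms : ∀ m ∈ ms, PySem.Chars.find cs m = -1) :
    (ms.foldl (fun acc m =>
        let chars := PySem.Chars.find cs m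
        if chars ≠ -1 then min chars acc else acc) acc) = acc := by
  induction ms generalizing acc with
  | nil => rfl
  | cons m ms ih =>
    rw [List.foldl_cons]
    simp only [hms m (List.mem_cons_self)]
    norm_num
    simpa using ih acc (fun m' hm' => hms m' (List.mem_cons_of_mem _ hm'))

-- a marker matching at position j is an infix of cs
theorem pvMatch_infix {m cs : List Char} {j : Nat} (h : m <+: cs.drop j) : m <:+: cs :=
  h.isInfix.trans (cs.drop_suffix j).isInfix

-- ===== VERDICT (by name: the statement is the Claim_ definition above) =====
theorem removeEndContent_spec : Claim_equal_removeEndContent := by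
  intro content _
  unfold Spec_removeEndContent removeEndContent removeEndContent_alt
  set cs := content.toList with hcs
  show (if pvAFold cs ≠ (cs.length : Int) then String.ofList (cs.take (pvAFold cs).toNat)
        else content)
      = (match pvBScan cs with
         | some i => String.ofList (cs.take i)
         | none => content)
  cases hscan : pvBScan cs with
  | none =>
    have hnone := (pvBScan_none_iff cs).mp hscan
    have hall : ∀ m ∈ pvEndMarkers, PySem.Chars.find cs m = -1 := by
      intro m hm
      rw [PySem.Chars.find_eq_neg_one_iff]
      intro hinf
      obtain ⟨j, hj⟩ := (PySem.Chars.exists_prefix_drop_iff_isIn m cs).mpr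
        ((PySem.Chars.isIn_iff_infix m cs).mpr hinf)
      have : pvBMatch (cs.drop j) = true := (pvBMatch_iff _).mpr ⟨m, hm, hj⟩
      rw [hnone j] at this
      exact absurd this (by simp)
    have hA : pvAFold cs = (cs.length : Int) := pvAFold_eq_acc_aux cs pvEndMarkers _ hall
    rw [hA, if_neg (by simp)]
  | some j =>
    obtain ⟨h1, h2⟩ := (pvBScan_some_iff cs j).mp hscan
    obtain ⟨m0, hm0, hp0⟩ := (pvBMatch_iff _).mp h1
    have hm0ne : m0 ≠ [] := pvEndMarkers_ne_nil m0 hm0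
    have hjlt : j < cs.length := by
      by_contra hge
      have : cs.drop j = [] := List.drop_eq_nil_of_le (by omega)
      rw [this] at hp0
      exact hm0ne (List.prefix_nil.mp hp0)
    -- any matched marker's find is ≥ j (no marker matches before j)
    have hge : ∀ m ∈ pvEndMarkers, PySem.Chars.find cs m ≠ -1 →
        (j : Int) ≤ PySem.Chars.find cs m := by
      intro m hm hf
      have hnn : 0 ≤ PySem.Chars.find cs m := by
        rw [PySem.Chars.find_nonneg_iff]
        exact (PySem.Chars.find_ne_neg_one_iff cs m).mp hf
      obtain ⟨hpre, -⟩ := PySem.Chars.find_spec (s := cs) (sub := m) hnn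
      by_contra hlt
      have hlt' : (PySem.Chars.find cs m).toNat < j := by omega
      have : pvBMatch (cs.drop (PySem.Chars.find cs m).toNat) = true :=
        (pvBMatch_iff _).mpr ⟨m, hm, hpre⟩
      rw [h2 _ hlt'] at this
      exact absurd this (by simp)
    -- the marker matched at j has find exactly j
    have hf0 : PySem.Chars.find cs m0 = (j : Int) := by
      have hne : PySem.Chars.find cs m0 ≠ -1 :=
        (PySem.Chars.find_ne_neg_one_iff cs m0).mpr (pvMatch_infix hp0)
      have hnn : 0 ≤ PySem.Chars.find cs m0 := by
        rw [PySem.Chars.find_nonneg_iff]; exact pvMatch_infix hp0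
      obtain ⟨-, hmin⟩ := PySem.Chars.find_spec (s := cs) (sub := m0) hnn
      have hle : (PySem.Chars.find cs m0).toNat ≤ j := by
        by_contra hgt
        exact hmin j (by omega) hp0
      have := hge m0 hm0 hne
      omega
    have hA : pvAFold cs = (j : Int) := by
      have hub : pvAFold cs ≤ (j : Int) := by
        have := pvAFold_le_find_aux cs pvEndMarkers (cs.length : Int) m0 hm0
          (by rw [hf0]; omega)
        rwa [hf0] at this
      have hlb : (j : Int) ≤ pvAFold cs :=
        pvAFold_ge_aux cs pvEndMarkers (cs.length : Int) (j : Int) (by omega) hge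
      omega
    rw [hA, if_pos (by omega)]
    simp
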